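-- pv_equiv track=rewrite | github.com/amosjames334/AGENTICAI | src/DataPipeline/preprocessing/chunker.py | _get_last_n_words_sentences
-- ===== SOURCE A (Python) =====
-- from typing import List, Optional
--
-- def _get_last_n_words_sentences(
--
--     sentences: List[str],
--     target_words: int
-- ) -> List[str]:
--     """Get the last few sentences that total approximately target_words"""
--     result = []
--     word_count = 0
--
--     for sentence in reversed(sentences):
--         sentence_words = len(sentence.split())
--         if word_count + sentence_words <= target_words:
--             result.insert(0, sentence)
--             word_count += sentence_words
--         else:
--             break
--
--     return result if result else [sentences[-1]]
-- ===== SOURCE B (Python) =====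
-- from typing import List
--
-- def _get_last_n_words_sentences(sentences: List[str], target_words: int) -> List[str]:
--     # Forward shrinking window: precompute the total word count, then drop
--     # sentences from the front while the remaining total exceeds target_words.
--     counts = [len(s.split()) for s in sentences]
--     total = sum(counts)
--     start = 0
--     while start < len(sentences) and total > target_words:
--         total -= counts[start]
--         start += 1
--     return sentences[start:] if start < len(sentences) else [sentences[-1]]
-- ===== Notes on version B (the rewrite author's own statement) =====
-- stated objective: alternative
-- what changed: B replaces A's reverse accumulate-and-break scan with a forward shrinking window: it precomputes all word counts and their total, then advances a start index from the front while the remaining total exceeds target_words, returning the slice sentences[start:].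
import Mathlib
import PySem

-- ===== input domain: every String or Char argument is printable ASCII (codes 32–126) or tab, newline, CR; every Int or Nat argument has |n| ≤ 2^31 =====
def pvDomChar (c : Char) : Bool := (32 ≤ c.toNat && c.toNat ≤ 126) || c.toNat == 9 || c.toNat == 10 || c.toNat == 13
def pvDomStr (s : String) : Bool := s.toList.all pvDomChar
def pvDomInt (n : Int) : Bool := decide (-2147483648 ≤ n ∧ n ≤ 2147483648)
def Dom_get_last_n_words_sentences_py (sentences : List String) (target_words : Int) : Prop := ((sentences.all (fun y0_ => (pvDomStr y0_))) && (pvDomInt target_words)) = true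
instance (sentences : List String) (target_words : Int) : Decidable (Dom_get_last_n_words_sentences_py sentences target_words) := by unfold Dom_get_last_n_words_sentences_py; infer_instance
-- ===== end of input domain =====

-- B is an alternative decomposition: a forward shrinking window over a precomputed
-- total word count, instead of A's reverse accumulate-and-break scan.

-- ===== PORT A =====
-- the 'for sentence in reversed(sentences)' loop with its early break;
-- state (word_count, result), result.insert(0, s) = cons
def pvGoA (target : Int) : List String → Int → List String → List String
  | [], _, result => result
  | s :: rest, wc, result =>
    let c : Int := ((PySem.Str.split₀ s).length : Int)
    if wc + c ≤ target then pvGoA target rest (wc + c) (s :: result) else result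

def get_last_n_words_sentences_py (sentences : List String) (target_words : Int) : List String :=
  let result := pvGoA target_words sentences.reverse 0 []
  if result = [] then
    match PySem.List.pyGet? sentences (-1) with   -- sentences[-1]; none = IndexError, excluded by Pre_
    | some s => [s]
    | none => []
  else result

-- ===== PORT B =====
-- the while loop 'while start < len(sentences) and total > target_words: total -= counts[start]; start += 1'
-- as structural recursion over the counts list; returns start
def pvGoB (target : Int) : List Int → Int → Nat
  | [], _ => 0
  | c :: rest, total => if total > target then 1 + pvGoB target rest (total - c) else 0

def get_last_n_words_sentences_py_alt (sentences : List String) (target_words : Int) : List String :=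
  let counts := sentences.map (fun s => ((PySem.Str.split₀ s).length : Int))
  let total := counts.sum
  let start := pvGoB target_words counts total
  if start < sentences.length then
    PySem.List.slice sentences (some (start : Int)) none   -- sentences[start:]
  else
    match PySem.List.pyGet? sentences (-1) with   -- sentences[-1]; none = IndexError, excluded by Pre_
    | some s => [s]
    | none => []

-- ===== PRECONDITION & SPEC =====
-- Pre_ excludes only the empty list, on which both A and B raise IndexError at sentences[-1].
def Pre_get_last_n_words_sentences_py (sentences : List String) (target_words : Int) : Prop := sentences ≠ []
instance (sentences : List String) (target_words : Int) : Decidable (Pre_get_last_n_words_sentences_py sentences target_words) := by unfold Pre_get_last_n_words_sentences_py; infer_instance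

def pvWitness_get_last_n_words_sentences_py : List String × Int := (["hello world", "a b c"], 4)

def Spec_get_last_n_words_sentences_py (sentences : List String) (target_words : Int) (out : List String) : Prop := out = get_last_n_words_sentences_py_alt sentences target_words
instance (sentences : List String) (target_words : Int) (out : List String) : Decidable (Spec_get_last_n_words_sentences_py sentences target_words out) := by unfold Spec_get_last_n_words_sentences_py; infer_instance

-- ===== CLAIM (what is proved, stated in full; the proofs are below) =====
def Claim_equal_get_last_n_words_sentences_py : Prop := ∀ (sentences : List String) (target_words : Int), Dom_get_last_n_words_sentences_py sentences target_words → Pre_get_last_n_words_sentences_py sentences target_words → Spec_get_last_n_words_sentences_py sentences target_words (get_last_n_words_sentences_py sentences target_words)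

-- ===== LEMMAS AND PROOFS =====

-- word count of one sentence, as Int
def pvWc (s : String) : Int := ((PySem.Str.split₀ s).length : Int)

-- total word count of a list of sentences
def pvSwc (l : List String) : Int := (l.map pvWc).sum

-- the longest prefix of l whose running word totals (starting at w) stay ≤ t
def pvPref (t : Int) : List String → Int → List String
  | [], _ => []
  | s :: rest, w => if w + pvWc s ≤ t then s :: pvPref t rest (w + pvWc s) else []

theorem pvWc_nonneg (s : String) : 0 ≤ pvWc s := by
  simp [pvWc]

theorem pvSwc_nonneg (l : List String) : 0 ≤ pvSwc l := by
  induction l with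
  | nil => simp [pvSwc]
  | cons s rest ih =>
      simp only [pvSwc, List.map_cons, List.sum_cons]
      have := pvWc_nonneg s
      simp only [pvSwc] at ih
      omega

theorem pvSwc_append_singleton (l : List String) (s : String) :
    pvSwc (l ++ [s]) = pvSwc l + pvWc s := by
  simp [pvSwc]

theorem pvSwc_reverse (l : List String) : pvSwc l.reverse = pvSwc l := by
  simp [pvSwc, List.sum_reverse]

theorem pvGoA_eq (t : Int) (l : List String) : ∀ (w : Int) (acc : List String),
    pvGoA t l w acc = (pvPref t l w).reverse ++ acc := by
  induction l with
  | nil => intro w acc; simp [pvGoA, pvPref]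
  | cons s rest ih =>
      intro w acc
      simp only [pvGoA, pvPref, pvWc]
      split
      · rw [ih]; simp
      · simp

theorem pvPref_length_le (t : Int) (l : List String) : ∀ (w : Int),
    (pvPref t l w).length ≤ l.length := by
  induction l with
  | nil => intro w; simp [pvPref]
  | cons s rest ih =>
      intro w
      simp only [pvPref]
      split
      · simpa using Nat.succ_le_succ (ih _)
      · simp

theorem pvPref_full (t : Int) (l : List String) : ∀ (w : Int), w + pvSwc l ≤ t →
    pvPref t l w = l := by
  induction l with
  | nil => intro w _; simp [pvPref]
  | cons s rest ih =>
      intro w h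
      simp only [pvSwc, List.map_cons, List.sum_cons] at h
      have hrest : 0 ≤ pvSwc rest := pvSwc_nonneg rest
      simp only [pvSwc] at hrest
      simp only [pvPref]
      rw [if_pos (by omega)]
      rw [ih (w + pvWc s) (by simp only [pvSwc]; omega)]

theorem pvPref_append (t : Int) (l₁ l₂ : List String) : ∀ (w : Int),
    pvPref t (l₁ ++ l₂) w =
      if pvPref t l₁ w = l₁ then l₁ ++ pvPref t l₂ (w + pvSwc l₁) else pvPref t l₁ w := by
  induction l₁ with
  | nil => intro w; simp [pvPref, pvSwc]
  | cons s rest ih =>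
      intro w
      simp only [List.cons_append, pvPref]
      by_cases hc : w + pvWc s ≤ t
      · rw [if_pos hc, if_pos hc, ih (w + pvWc s)]
        by_cases hr : pvPref t rest (w + pvWc s) = rest
        · rw [if_pos hr, if_pos (by rw [hr])]
          simp only [pvSwc, List.map_cons, List.sum_cons]
          ring_nf
        · rw [if_neg hr, if_neg (by simpa using hr)]
      · simp [hc]

theorem pvPref_eq_take (t : Int) (l : List String) : ∀ (w : Int),
    pvPref t l w = l.take (pvPref t l w).length := by
  induction l with
  | nil => intro w; simp [pvPref]
  | cons s rest ih =>
      intro w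
      simp only [pvPref]
      split
      · simp only [List.length_cons, List.take_succ_cons]
        rw [← ih]
      · simp

theorem pvKey (t : Int) (ss : List String) :
    pvGoB t (ss.map pvWc) (pvSwc ss) = ss.length - (pvPref t ss.reverse 0).length := by
  induction ss with
  | nil => simp [pvGoB, pvSwc, pvPref]
  | cons s rest ih =>
      have hswc : pvSwc (s :: rest) = pvWc s + pvSwc rest := by simp [pvSwc]
      simp only [List.map_cons, pvGoB, hswc]
      by_cases h : pvWc s + pvSwc rest > t
      · rw [if_pos h]
        have hsub : pvWc s + pvSwc rest - pvWc s = pvSwc rest := by ring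
        rw [hsub, ih]
        simp only [List.reverse_cons]
        rw [pvPref_append]
        have hlast : pvPref t [s] (0 + pvSwc rest.reverse) = [] := by
          simp only [pvPref, pvSwc_reverse]
          rw [if_neg (by omega)]
        have hle := pvPref_length_le t rest.reverse 0
        by_cases hfull : pvPref t rest.reverse 0 = rest.reverse
        · rw [if_pos hfull, hlast, hfull]
          simp only [List.append_nil, List.length_reverse, List.length_cons]
          omega
        · rw [if_neg hfull]
          simp only [List.length_reverse] at hle
          simp only [List.length_cons]
          omega
      · rw [if_neg h]
        simp only [List.reverse_cons]
        have hfull : pvPref t (rest.reverse ++ [s]) 0 = rest.reverse ++ [s] := by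
          apply pvPref_full
          rw [pvSwc_append_singleton, pvSwc_reverse]
          omega
        rw [hfull]
        simp

-- ===== VERDICT (by name: the statement is the Claim_ definition above) =====
theorem get_last_n_words_sentences_py_spec : Claim_equal_get_last_n_words_sentences_py := by
  intro sentences t _ hpre
  unfold Spec_get_last_n_words_sentences_py
  unfold get_last_n_words_sentences_py get_last_n_words_sentences_py_alt
  simp only []
  rw [pvGoA_eq]
  have hmap : sentences.map (fun s => ((PySem.Str.split₀ s).length : Int)) = sentences.map pvWc := by
    simp [pvWc]
  have hsum : (sentences.map pvWc).sum = pvSwc sentences := rfl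
  rw [hmap, hsum, pvKey]
  set k := (pvPref t sentences.reverse 0).length with hk
  have hkle : k ≤ sentences.length := by
    have := pvPref_length_le t sentences.reverse 0
    simpa using this
  by_cases hk0 : k = 0
  · -- prefix empty: both fall back to [sentences[-1]]
    have hnil : pvPref t sentences.reverse 0 = [] := List.eq_nil_of_length_eq_zero (hk ▸ hk0)
    rw [hnil]
    have hstart : ¬ (sentences.length - 0 < sentences.length) := by omega
    simp
    intro _ hkpos
    exact absurd hkpos (by omega)
  · -- prefix nonempty: A returns it reversed, B drops to the same suffix
    have hne : pvPref t sentences.reverse 0 ≠ [] := by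
      intro h; exact hk0 (by rw [hk, h]; rfl)
    have hlen : 0 < sentences.length := by
      cases sentences with
      | nil => exact absurd rfl hpre
      | cons _ _ => simp
    have hstart : sentences.length - k < sentences.length := by omega
    rw [if_neg (by simpa using hne), if_pos hstart]
    rw [PySem.List.slice_from_natCast]
    have htake : pvPref t sentences.reverse 0 = sentences.reverse.take k := by
      have h := pvPref_eq_take t sentences.reverse 0
      rw [← hk] at h; exact h
    rw [htake]
    rw [List.take_reverse]
    simp
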